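-- pv_equiv track=rewrite | github.com/yeongkyo1997/Algorithm | 프로그래머스/lv3/131702. 고고학 최고의 발견/고고학 최고의 발견.py | solution
-- ===== SOURCE A (Python) =====
-- import copy
--
-- def solution(clockHands):
--     size = len(clockHands)
--     minVal = 10 ** 9
--
--     choice = [0] * size
--     maxSize = 4 ** size
--
--     for i in range(maxSize):
--         count = solveCount(size, choice, clockHands);
--         if count < minVal:
--             minVal = count
--         nextChoice(choice)
--
--     return minVal
--
-- def nextChoice(choice):
--     for i in range(len(choice)):
--         choice[i] += 1
--         if choice[i] == 4:
--             choice[i] = 0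
--         else:
--             break
--
-- def complement(size, out, row):
--     for i in range(size):
--         out[i] = (4 - row[i]) % 4
--
-- def solveCount(size, firstChoice, puzzle):
--     count = 0
--
--     prevChoice = [0] * size
--     curRow = [0] * size
--
--     curChoice = copy.deepcopy(firstChoice)
--
--     for i in range(size):
--         for choice in curChoice:
--             count += choice
--         calcRow(size, curRow, puzzle[i], prevChoice, curChoice)
--
--         tmp = prevChoice
--         prevChoice = curChoice
--         curChoice = tmp
--
--         complement(size, curChoice, curRow)
--     for elem in curRow:
--         if elem != 0:
--             return 10 ** 9
--     return count
--
-- def calcRow(size, out, row, prevChoice, curChoice):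
--     endIdx = size - 1
--     out[0] = (row[0] + prevChoice[0] + curChoice[0] + curChoice[1]) % 4
--
--     for i in range(1, endIdx):
--         out[i] = (row[i] + prevChoice[i] + curChoice[i - 1] + curChoice[i] + curChoice[i + 1]) % 4
--     out[endIdx] = (row[endIdx] + prevChoice[endIdx] + curChoice[endIdx - 1] + curChoice[endIdx]) % 4
-- ===== SOURCE B (Python) =====
-- def solution(clockHands):
--     # Superposition over Z/4: the forced downward propagation is affine in the
--     # first-row choice, so simulate it only n+1 times (zero choice + each unit
--     # choice), then evaluate every candidate as a linear combination of the
--     # precomputed response tables instead of re-simulating it.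
--     n = len(clockHands)
--
--     def cascade(first):
--         # forced propagation for one first-row choice; returns the n press rows
--         # and the last residual row that must be all zero
--         prev = [0] * n
--         cur = list(first)
--         rows = []
--         last = [0] * n
--         for i in range(n):
--             rows.append(cur)
--             pressed = []
--             for c in range(n):
--                 v = clockHands[i][c] + prev[c] + cur[c]
--                 if c > 0:
--                     v += cur[c - 1]
--                 if c + 1 < n:
--                     v += cur[c + 1]
--                 pressed.append(v % 4)
--             prev, cur, last = cur, [(4 - x) % 4 for x in pressed], pressed
--         return rows, last
--
--     base_rows, base_last = cascade([0] * n)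
--     drows = []
--     dlast = []
--     for j in range(n):
--         rj, lj = cascade([1 if c == j else 0 for c in range(n)])
--         drows.append([[rj[i][c] - base_rows[i][c] for c in range(n)] for i in range(n)])
--         dlast.append([lj[c] - base_last[c] for c in range(n)])
--
--     best = 10 ** 9
--     for mask in range(4 ** n):
--         t = [(mask >> (2 * j)) & 3 for j in range(n)]
--         if any((base_last[c] + sum(t[j] * dlast[j][c] for j in range(n))) % 4 != 0
--                for c in range(n)):
--             continue
--         cost = 0
--         for i in range(n):
--             for c in range(n):
--                 cost += (base_rows[i][c]
--                          + sum(t[j] * drows[j][i][c] for j in range(n))) % 4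
--         if cost < best:
--             best = cost
--     return best
-- ===== Notes on version B (the rewrite author's own statement) =====
-- stated objective: alternative
-- what changed: B exploits that the forced downward propagation is affine over Z/4: it simulates the cascade only n+1 times (zero first row and each unit first row) to build response tables, then scores each of the 4^n candidate first rows as a linear combination of those tables (skipping the cost sum when the residual row is nonzero), instead of A's per-candidate re-simulation with deepcopy and rotating choice buffers.
import Mathlib
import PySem

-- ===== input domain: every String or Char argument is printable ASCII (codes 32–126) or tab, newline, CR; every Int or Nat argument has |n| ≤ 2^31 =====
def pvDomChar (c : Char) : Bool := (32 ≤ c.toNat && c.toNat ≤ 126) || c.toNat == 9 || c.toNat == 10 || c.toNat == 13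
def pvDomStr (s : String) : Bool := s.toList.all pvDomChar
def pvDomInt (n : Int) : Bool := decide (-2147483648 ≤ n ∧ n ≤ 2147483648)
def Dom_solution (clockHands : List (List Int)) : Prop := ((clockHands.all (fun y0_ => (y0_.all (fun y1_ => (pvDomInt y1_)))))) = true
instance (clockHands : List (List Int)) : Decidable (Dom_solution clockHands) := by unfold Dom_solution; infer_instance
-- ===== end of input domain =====

-- B evaluates each candidate first row by superposition (the forced cascade is affine over
-- Z/4, so it is simulated only n+1 times and each candidate is scored from precomputed
-- response tables) instead of A's per-candidate re-simulation; neither mutates the argument.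

-- ===== PORT A =====
-- xs[i] on an index the loop keeps in range (Pre_ guarantees it); getD's default is never
-- reached on inputs satisfying Pre_solution (A raises IndexError exactly there).
def pvIdx (l : List Int) (i : Nat) : Int := l.getD i 0
def pvRowA (p : List (List Int)) (i : Nat) : List Int := p.getD i []

def nextChoiceA : List Int → List Int
  | [] => []
  | c :: rest => if c + 1 = 4 then 0 :: nextChoiceA rest else (c + 1) :: rest

-- calcRow writes out[0], then out[1..size-2], then out[size-1]; for size ≥ 2 (Pre_) the three
-- writes are disjoint, so the final buffer is this positionwise map.  Python's % 4 = Int's % 4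
-- (emod) exactly, since the divisor is positive.
def calcRowA (size : Nat) (row prev cur : List Int) : List Int :=
  (List.range size).map (fun i =>
    if i = 0 then (pvIdx row 0 + pvIdx prev 0 + pvIdx cur 0 + pvIdx cur 1) % 4
    else if i = size - 1 then (pvIdx row i + pvIdx prev i + pvIdx cur (i - 1) + pvIdx cur i) % 4
    else (pvIdx row i + pvIdx prev i + pvIdx cur (i - 1) + pvIdx cur i + pvIdx cur (i + 1)) % 4)

def complementA (row : List Int) : List Int := row.map (fun x => (4 - x) % 4)

def solveCountA (size : Nat) (firstChoice : List Int) (puzzle : List (List Int)) : Int :=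
  let s := (List.range size).foldl
    (fun (st : Int × List Int × List Int × List Int) i =>
      let count := st.2.2.1.foldl (· + ·) st.1
      let curRow := calcRowA size (pvRowA puzzle i) st.2.1 st.2.2.1
      (count, st.2.2.1, complementA curRow, curRow))
    (0, List.replicate size 0, firstChoice, List.replicate size 0)
  if s.2.2.2.any (fun e => e ≠ 0) then 10 ^ 9 else s.1

def solution (clockHands : List (List Int)) : Int :=
  let size := clockHands.length
  ((List.range (4 ^ size)).foldl
    (fun (st : Int × List Int) _ =>
      let count := solveCountA size st.2 clockHands
      ((if count < st.1 then count else st.1), nextChoiceA st.2))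
    ((10 : Int) ^ 9, List.replicate size 0)).1

-- ===== PORT B =====
-- Source B's cascade(first): forced propagation for one first-row choice; returns the n press
-- rows and the last residual row.
def cascadeB (n : Nat) (p : List (List Int)) (first : List Int) :
    List (List Int) × List Int :=
  let s := (List.range n).foldl
    (fun (st : List Int × List Int × List (List Int) × List Int) i =>
      let prev := st.1
      let cur := st.2.1
      let pressed := (List.range n).map (fun c =>
        let v := pvIdx (pvRowA p i) c + pvIdx prev c + pvIdx cur c
        let v := if 0 < c then v + pvIdx cur (c - 1) else v
        let v := if c + 1 < n then v + pvIdx cur (c + 1) else v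
        v % 4)
      (cur, pressed.map (fun x => (4 - x) % 4), st.2.2.1 ++ [cur], pressed))
    (List.replicate n 0, first, [], List.replicate n 0)
  (s.2.2.1, s.2.2.2)

def unitB (n j : Nat) : List Int := (List.range n).map (fun c => if c = j then 1 else 0)

def decodeB (size m : Nat) : List Int :=
  (List.range size).map (fun i => (((m >>> (2 * i)) &&& 3 : Nat) : Int))

def solution_alt (clockHands : List (List Int)) : Int :=
  let n := clockHands.length
  let base := cascadeB n clockHands (List.replicate n 0)
  let ds := (List.range n).map (fun j =>
    let u := cascadeB n clockHands (unitB n j)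
    ((List.range n).map (fun i => (List.range n).map (fun c =>
        pvIdx (pvRowA u.1 i) c - pvIdx (pvRowA base.1 i) c)),
     (List.range n).map (fun c => pvIdx u.2 c - pvIdx base.2 c)))
  (List.range (4 ^ n)).foldl
    (fun best mask =>
      let t := decodeB n mask
      if (List.range n).any (fun c =>
          (pvIdx base.2 c +
            ((List.range n).map (fun j =>
              pvIdx t j * pvIdx (ds.getD j ([], [])).2 c)).sum) % 4 ≠ 0)
      then best
      else
        let cost := ((List.range n).map (fun i =>
          ((List.range n).map (fun c =>
            (pvIdx (pvRowA base.1 i) c +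
              ((List.range n).map (fun j =>
                pvIdx t j * pvIdx (pvRowA (ds.getD j ([], [])).1 i) c)).sum) % 4)).sum)).sum
        if cost < best then cost else best)
    ((10 : Int) ^ 9)

-- ===== PRECONDITION & SPEC =====
-- Pre_ excludes exactly the inputs where the Python A raises IndexError: 1×1 grids
-- (calcRow reads curChoice[1]) and grids with a row shorter than len(clockHands).
def Pre_solution (clockHands : List (List Int)) : Prop :=
  clockHands.length ≠ 1 ∧ ∀ row ∈ clockHands, clockHands.length ≤ row.length
instance (clockHands : List (List Int)) : Decidable (Pre_solution clockHands) := by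
  unfold Pre_solution; infer_instance

def pvWitness_solution : List (List Int) := [[0, 3], [1, 2]]

def Spec_solution (clockHands : List (List Int)) (out : Int) : Prop := out = solution_alt clockHands
instance (clockHands : List (List Int)) (out : Int) : Decidable (Spec_solution clockHands out) := by
  unfold Spec_solution; infer_instance

-- ===== CLAIM (what is proved, stated in full; the proofs are below) =====
def Claim_equal_solution : Prop := ∀ (clockHands : List (List Int)), Dom_solution clockHands → Pre_solution clockHands → Spec_solution clockHands (solution clockHands)

-- ===== LEMMAS AND PROOFS =====

-- A's per-row step and its fold (the body of solveCountA), named for the proofs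
def stepA (size : Nat) (puzzle : List (List Int)) (st : Int × List Int × List Int × List Int)
    (i : Nat) : Int × List Int × List Int × List Int :=
  let count := st.2.2.1.foldl (· + ·) st.1
  let curRow := calcRowA size (pvRowA puzzle i) st.2.1 st.2.2.1
  (count, st.2.2.1, complementA curRow, curRow)

def FAfold (n : Nat) (p : List (List Int)) (t : List Int) (r : Nat) :
    Int × List Int × List Int × List Int :=
  (List.range r).foldl (stepA n p) (0, List.replicate n 0, t, List.replicate n 0)

theorem solveCountA_eq (size : Nat) (t : List Int) (p : List (List Int)) :
    solveCountA size t p =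
      (if (FAfold size p t size).2.2.2.any (fun e => e ≠ 0) then 10 ^ 9
       else (FAfold size p t size).1) := rfl

theorem FA_succ (n : Nat) (p : List (List Int)) (t : List Int) (r : Nat) :
    FAfold n p t (r + 1) = stepA n p (FAfold n p t r) r := by
  unfold FAfold
  rw [List.range_succ, List.foldl_append, List.foldl_cons, List.foldl_nil]

theorem getD_map_range {α : Type} (n : Nat) (f : Nat → α) (j : Nat) (d : α) (h : j < n) :
    ((List.range n).map f).getD j d = f j := by
  simp [List.getD_eq_getElem?_getD, h]

theorem getD_replicate_zero (n c : Nat) : (List.replicate n (0:Int)).getD c 0 = 0 := by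
  by_cases h : c < n
  · simp [List.getD_eq_getElem?_getD, h]
  · rw [List.getD_eq_default _ _ (by simp; omega)]

theorem calcRowA_length (n : Nat) (row prev cur : List Int) :
    (calcRowA n row prev cur).length = n := by simp [calcRowA]

theorem unitB_length (n j : Nat) : (unitB n j).length = n := by simp [unitB]

theorem lensA (n : Nat) (p : List (List Int)) (t : List Int) (ht : t.length = n) (r : Nat) :
    (FAfold n p t r).2.1.length = n ∧ (FAfold n p t r).2.2.1.length = n := by
  induction r with
  | zero => exact ⟨by simp [FAfold], by simpa [FAfold] using ht⟩
  | succ r ih =>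
    rw [FA_succ]
    exact ⟨ih.2, by simp [stepA, complementA, calcRowA_length]⟩

theorem ext_getD (l1 l2 : List Int) (hl : l1.length = l2.length)
    (h : ∀ j, j < l1.length → l1.getD j 0 = l2.getD j 0) : l1 = l2 := by
  apply List.ext_getElem hl
  intro i h1 h2
  have := h i h1
  rwa [List.getD_eq_getElem _ _ h1, List.getD_eq_getElem _ _ h2] at this

theorem getD_complementA (l : List Int) (j : Nat) (h : j < l.length) :
    (complementA l).getD j 0 = (4 - l.getD j 0) % 4 := by
  unfold complementA
  rw [List.getD_eq_getElem _ _ (by simpa using h), List.getElem_map,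
      List.getD_eq_getElem _ _ h]

theorem foldl_add_sum (l : List Int) (a : Int) : l.foldl (· + ·) a = a + l.sum := by
  induction l generalizing a with
  | nil => simp
  | cons x xs ih => simp [List.foldl_cons, ih]; ring

theorem lsum_eq (n : Nat) (f : Nat → Int) :
    ((List.range n).map f).sum = ∑ j ∈ Finset.range n, f j := by
  induction n with
  | zero => simp
  | succ n ih => simp [List.range_succ, Finset.sum_range_succ, ih]

theorem sum_map_getD (k : List Int) (n : Nat) (h : k.length = n) :
    ((List.range n).map (fun c => k.getD c 0)).sum = k.sum := by
  subst h
  have : (List.range k.length).map (fun c => k.getD c 0) = k := by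
    apply List.ext_getElem
    · simp
    · intro i h1 h2
      simp [List.getD_eq_getElem?_getD, h2]
  rw [this]

-- the affine combination of a quantity over the zero choice and the unit choices
def combF (n : Nat) (t : List Int) (f : List Int → Int) : Int :=
  f (List.replicate n 0) +
    ∑ j ∈ Finset.range n, pvIdx t j * (f (unitB n j) - f (List.replicate n 0))

theorem combF_const (n : Nat) (t : List Int) (K : Int) : combF n t (fun _ => K) = K := by
  simp [combF]

theorem combF_add (n : Nat) (t : List Int) (f g : List Int → Int) :
    combF n t (fun s => f s + g s) = combF n t f + combF n t g := by
  unfold combF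
  rw [Finset.sum_congr rfl (fun j _ => show
    pvIdx t j * ((f (unitB n j) + g (unitB n j)) - (f (List.replicate n 0) + g (List.replicate n 0)))
      = pvIdx t j * (f (unitB n j) - f (List.replicate n 0))
        + pvIdx t j * (g (unitB n j) - g (List.replicate n 0)) by ring),
    Finset.sum_add_distrib]
  ring

theorem combF_neg (n : Nat) (t : List Int) (f : List Int → Int) :
    combF n t (fun s => -f s) = -combF n t f := by
  unfold combF
  rw [Finset.sum_congr rfl (fun j _ => show
    pvIdx t j * (-f (unitB n j) - -f (List.replicate n 0))
      = -(pvIdx t j * (f (unitB n j) - f (List.replicate n 0))) by ring),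
    Finset.sum_neg_distrib]
  ring

theorem combF_ite (n : Nat) (t : List Int) (P : Prop) [Decidable P] (f : List Int → Int) :
    combF n t (fun s => if P then f s else 0) = if P then combF n t f else 0 := by
  split_ifs with h
  · rfl
  · exact combF_const n t 0

theorem pvIdx_unit (n j c : Nat) (h : c < n) :
    pvIdx (unitB n j) c = if c = j then 1 else 0 := by
  unfold pvIdx unitB
  exact getD_map_range n _ c 0 h

theorem combF_idx (n : Nat) (t : List Int) (c : Nat) (h : c < n) :
    combF n t (fun s => pvIdx s c) = pvIdx t c := by
  unfold combF
  simp only []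
  rw [show pvIdx (List.replicate n 0) c = 0 from getD_replicate_zero n c,
    Finset.sum_congr rfl (fun j _ => show
      pvIdx t j * (pvIdx (unitB n j) c - 0) = if c = j then pvIdx t j else 0 by
        rw [pvIdx_unit n j c h]; split_ifs <;> ring),
    Finset.sum_ite_eq (Finset.range n) c (fun j => pvIdx t j)]
  simp [Finset.mem_range.mpr h]

theorem sum_modeq (s : Finset ℕ) (f g : ℕ → Int)
    (h : ∀ j ∈ s, f j ≡ g j [ZMOD 4]) :
    (∑ j ∈ s, f j) ≡ (∑ j ∈ s, g j) [ZMOD 4] := by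
  unfold Int.ModEq
  rw [Finset.sum_int_mod s _ f, Finset.sum_int_mod s _ g,
      Finset.sum_congr rfl (fun j hj => h j hj)]

theorem combF_modeq (n : Nat) (t : List Int) (f g : List Int → Int)
    (hz : f (List.replicate n 0) ≡ g (List.replicate n 0) [ZMOD 4])
    (hu : ∀ j, j < n → f (unitB n j) ≡ g (unitB n j) [ZMOD 4]) :
    combF n t f ≡ combF n t g [ZMOD 4] := by
  unfold combF
  exact Int.ModEq.add hz (sum_modeq _ _ _ (fun j hj =>
    Int.ModEq.mul_left _ (Int.ModEq.sub (hu j (Finset.mem_range.mp hj)) hz)))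

-- the unreduced press value of column c (B's guarded formula)
def rawv (n : Nat) (row prev cur : List Int) (c : Nat) : Int :=
  pvIdx row c + pvIdx prev c + pvIdx cur c + (if 0 < c then pvIdx cur (c - 1) else 0) +
    (if c + 1 < n then pvIdx cur (c + 1) else 0)

theorem calcRow_raw (n : Nat) (row prev cur : List Int) (hcur : cur.length = n)
    (c : Nat) (hc : c < n) :
    pvIdx (calcRowA n row prev cur) c = rawv n row prev cur c % 4 := by
  unfold pvIdx calcRowA rawv
  rw [getD_map_range n _ c 0 hc]
  by_cases h0 : c = 0
  · subst h0
    rw [if_pos rfl, if_neg (by omega)]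
    by_cases h1 : 1 < n
    · rw [if_pos h1]; congr 1; unfold pvIdx; ring
    · have hn : n = 1 := by omega
      have h2 : cur.getD 1 0 = 0 := List.getD_eq_default _ _ (by omega)
      rw [if_neg h1]; unfold pvIdx; rw [h2]; congr 1; ring
  · rw [if_neg h0]
    by_cases hl : c = n - 1
    · rw [if_pos hl, if_pos (by omega), if_neg (by omega)]
      congr 1; unfold pvIdx; ring
    · rw [if_neg hl, if_pos (by omega), if_pos (by omega)]
      congr 1; unfold pvIdx; ring

theorem pressedB_eq (n : Nat) (row prev cur : List Int) (hcur : cur.length = n) :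
    ((List.range n).map (fun c =>
        let v := pvIdx row c + pvIdx prev c + pvIdx cur c
        let v := if 0 < c then v + pvIdx cur (c - 1) else v
        let v := if c + 1 < n then v + pvIdx cur (c + 1) else v
        v % 4)) = calcRowA n row prev cur := by
  apply ext_getD
  · rw [List.length_map, List.length_range, calcRowA_length]
  · intro c hc
    rw [List.length_map, List.length_range] at hc
    rw [getD_map_range n _ c 0 hc]
    have hcr : (calcRowA n row prev cur).getD c 0 = rawv n row prev cur c % 4 :=
      calcRow_raw n row prev cur hcur c hc
    rw [hcr]
    unfold rawv
    simp only []
    split_ifs <;> (congr 1 <;> ring)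

theorem modeq_compl (a b : Int) (h : a ≡ b [ZMOD 4]) :
    ((4 - a % 4) % 4 : Int) ≡ -b [ZMOD 4] := by
  unfold Int.ModEq at *
  omega

theorem modeq_self_mod (a : Int) : (a % 4 : Int) ≡ a [ZMOD 4] := by
  unfold Int.ModEq
  omega

-- the affinity invariant: every component of A's cascade state is, mod 4, the affine
-- combination of its values at the zero choice and the unit choices
theorem invA (n : Nat) (p : List (List Int)) (t : List Int) (ht : t.length = n) (r : Nat) :
    (∀ c, c < n →
       pvIdx (FAfold n p t r).2.1 c ≡ combF n t (fun s => pvIdx (FAfold n p s r).2.1 c) [ZMOD 4])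
  ∧ (∀ c, c < n →
       pvIdx (FAfold n p t r).2.2.1 c ≡ combF n t (fun s => pvIdx (FAfold n p s r).2.2.1 c) [ZMOD 4])
  ∧ (∀ c, c < n → 0 < r →
       pvIdx (FAfold n p t r).2.2.2 c ≡ combF n t (fun s => pvIdx (FAfold n p s r).2.2.2 c) [ZMOD 4]) := by
  induction r with
  | zero =>
    refine ⟨fun c hc => ?_, fun c hc => ?_, fun c hc h0 => absurd h0 (by omega)⟩
    · simp only [FAfold, List.range_zero, List.foldl_nil]
      rw [combF_const]
    · simp only [FAfold, List.range_zero, List.foldl_nil]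
      rw [combF_idx n t c hc]
  | succ r ih =>
    obtain ⟨IHp, IHc, _⟩ := ih
    have hraw : ∀ c, c < n →
        rawv n (pvRowA p r) (FAfold n p t r).2.1 (FAfold n p t r).2.2.1 c ≡
          combF n t (fun s =>
            rawv n (pvRowA p r) (FAfold n p s r).2.1 (FAfold n p s r).2.2.1 c) [ZMOD 4] := by
      intro c hc
      have hd : combF n t (fun s =>
            rawv n (pvRowA p r) (FAfold n p s r).2.1 (FAfold n p s r).2.2.1 c)
          = pvIdx (pvRowA p r) c
            + combF n t (fun s => pvIdx (FAfold n p s r).2.1 c)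
            + combF n t (fun s => pvIdx (FAfold n p s r).2.2.1 c)
            + (if 0 < c then combF n t (fun s => pvIdx (FAfold n p s r).2.2.1 (c - 1)) else 0)
            + (if c + 1 < n then combF n t (fun s => pvIdx (FAfold n p s r).2.2.1 (c + 1)) else 0) := by
        unfold rawv
        rw [combF_add n t
              (fun s => pvIdx (pvRowA p r) c + pvIdx (FAfold n p s r).2.1 c
                + pvIdx (FAfold n p s r).2.2.1 c
                + (if 0 < c then pvIdx (FAfold n p s r).2.2.1 (c - 1) else 0))
              (fun s => if c + 1 < n then pvIdx (FAfold n p s r).2.2.1 (c + 1) else 0),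
            combF_add n t
              (fun s => pvIdx (pvRowA p r) c + pvIdx (FAfold n p s r).2.1 c
                + pvIdx (FAfold n p s r).2.2.1 c)
              (fun s => if 0 < c then pvIdx (FAfold n p s r).2.2.1 (c - 1) else 0),
            combF_add n t
              (fun s => pvIdx (pvRowA p r) c + pvIdx (FAfold n p s r).2.1 c)
              (fun s => pvIdx (FAfold n p s r).2.2.1 c),
            combF_add n t (fun _ => pvIdx (pvRowA p r) c)
              (fun s => pvIdx (FAfold n p s r).2.1 c),
            combF_const, combF_ite, combF_ite]
      rw [hd]
      unfold rawv
      refine Int.ModEq.add (Int.ModEq.add (Int.ModEq.add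
        (Int.ModEq.add (Int.ModEq.refl _) (IHp c hc)) (IHc c hc)) ?_) ?_
      · split_ifs with h
        · exact IHc (c - 1) (by omega)
        · exact Int.ModEq.refl 0
      · split_ifs with h
        · exact IHc (c + 1) h
        · exact Int.ModEq.refl 0
    have hcurval : ∀ s : List Int, s.length = n → ∀ c, c < n →
        pvIdx (FAfold n p s (r + 1)).2.2.1 c
          = (4 - rawv n (pvRowA p r) (FAfold n p s r).2.1 (FAfold n p s r).2.2.1 c % 4) % 4 := by
      intro s hs c hc
      rw [FA_succ]
      show pvIdx (complementA (calcRowA n (pvRowA p r)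
        (FAfold n p s r).2.1 (FAfold n p s r).2.2.1)) c = _
      unfold pvIdx
      rw [getD_complementA _ _ (by rw [calcRowA_length]; exact hc)]
      have h2 := calcRow_raw n (pvRowA p r) (FAfold n p s r).2.1 (FAfold n p s r).2.2.1
        (lensA n p s hs r).2 c hc
      unfold pvIdx at h2
      rw [h2]
    have hfinval : ∀ s : List Int, s.length = n → ∀ c, c < n →
        pvIdx (FAfold n p s (r + 1)).2.2.2 c
          = rawv n (pvRowA p r) (FAfold n p s r).2.1 (FAfold n p s r).2.2.1 c % 4 := by
      intro s hs c hc
      rw [FA_succ]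
      show pvIdx (calcRowA n (pvRowA p r) (FAfold n p s r).2.1 (FAfold n p s r).2.2.1) c = _
      exact calcRow_raw n (pvRowA p r) (FAfold n p s r).2.1 (FAfold n p s r).2.2.1
        (lensA n p s hs r).2 c hc
    refine ⟨fun c hc => ?_, fun c hc => ?_, fun c hc _ => ?_⟩
    · have h1 : ∀ s : List Int, (FAfold n p s (r + 1)).2.1 = (FAfold n p s r).2.2.1 :=
        fun s => by rw [FA_succ]; rfl
      have h2 : (fun s : List Int => pvIdx (FAfold n p s (r + 1)).2.1 c)
          = (fun s => pvIdx (FAfold n p s r).2.2.1 c) := funext fun s => by rw [h1]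
      rw [h1, h2]
      exact IHc c hc
    · rw [hcurval t ht c hc]
      have step1 : ((4 - rawv n (pvRowA p r) (FAfold n p t r).2.1 (FAfold n p t r).2.2.1 c % 4) % 4 : Int)
          ≡ -(combF n t (fun s =>
              rawv n (pvRowA p r) (FAfold n p s r).2.1 (FAfold n p s r).2.2.1 c)) [ZMOD 4] :=
        modeq_compl _ _ (hraw c hc)
      have step2 := (combF_neg n t (fun s =>
        rawv n (pvRowA p r) (FAfold n p s r).2.1 (FAfold n p s r).2.2.1 c)).symm
      have step3 : combF n t (fun s =>
            -(rawv n (pvRowA p r) (FAfold n p s r).2.1 (FAfold n p s r).2.2.1 c))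
          ≡ combF n t (fun s => pvIdx (FAfold n p s (r + 1)).2.2.1 c) [ZMOD 4] := by
        apply combF_modeq
        · rw [hcurval (List.replicate n 0) (by simp) c hc]
          exact (modeq_compl _ _ (Int.ModEq.refl _)).symm
        · intro j hj
          rw [hcurval (unitB n j) (unitB_length n j) c hc]
          exact (modeq_compl _ _ (Int.ModEq.refl _)).symm
      exact step1.trans (step2 ▸ step3)
    · rw [hfinval t ht c hc]
      have step1 : (rawv n (pvRowA p r) (FAfold n p t r).2.1 (FAfold n p t r).2.2.1 c % 4 : Int)
          ≡ combF n t (fun s =>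
              rawv n (pvRowA p r) (FAfold n p s r).2.1 (FAfold n p s r).2.2.1 c) [ZMOD 4] :=
        (modeq_self_mod _).trans (hraw c hc)
      have step2 : combF n t (fun s =>
            rawv n (pvRowA p r) (FAfold n p s r).2.1 (FAfold n p s r).2.2.1 c)
          ≡ combF n t (fun s => pvIdx (FAfold n p s (r + 1)).2.2.2 c) [ZMOD 4] := by
        apply combF_modeq
        · rw [hfinval (List.replicate n 0) (by simp) c hc]
          exact (modeq_self_mod _).symm
        · intro j hj
          rw [hfinval (unitB n j) (unitB_length n j) c hc]
          exact (modeq_self_mod _).symm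
      exact step1.trans step2

-- bridge: cascadeB's fold state is exactly A's cascade state plus the collected rows
theorem cascB_aux (n : Nat) (p : List (List Int)) (first : List Int) (hf : first.length = n)
    (r : Nat) :
    (List.range r).foldl
      (fun (st : List Int × List Int × List (List Int) × List Int) i =>
        let prev := st.1
        let cur := st.2.1
        let pressed := (List.range n).map (fun c =>
          let v := pvIdx (pvRowA p i) c + pvIdx prev c + pvIdx cur c
          let v := if 0 < c then v + pvIdx cur (c - 1) else v
          let v := if c + 1 < n then v + pvIdx cur (c + 1) else v
          v % 4)
        (cur, pressed.map (fun x => (4 - x) % 4), st.2.2.1 ++ [cur], pressed))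
      (List.replicate n 0, first, [], List.replicate n 0)
    = ((FAfold n p first r).2.1, (FAfold n p first r).2.2.1,
       (List.range r).map (fun i => (FAfold n p first i).2.2.1),
       (FAfold n p first r).2.2.2) := by
  induction r with
  | zero => simp [FAfold]
  | succ r ih =>
    rw [List.range_succ, List.foldl_append, List.foldl_cons, List.foldl_nil, ih]
    simp only []
    rw [pressedB_eq n (pvRowA p r) (FAfold n p first r).2.1 (FAfold n p first r).2.2.1
          (lensA n p first hf r).2]
    rw [FA_succ]
    refine congrArg₂ Prod.mk rfl (congrArg₂ Prod.mk rfl (congrArg₂ Prod.mk ?_ rfl))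
    rw [List.map_append]
    rfl

theorem cascB (n : Nat) (p : List (List Int)) (first : List Int) (hf : first.length = n) :
    cascadeB n p first
      = ((List.range n).map (fun i => (FAfold n p first i).2.2.1),
         (FAfold n p first n).2.2.2) := by
  unfold cascadeB
  rw [cascB_aux n p first hf n]

theorem countA_sum (n : Nat) (p : List (List Int)) (t : List Int) (ht : t.length = n)
    (r : Nat) :
    (FAfold n p t r).1
      = ∑ i ∈ Finset.range r, ∑ c ∈ Finset.range n, pvIdx (FAfold n p t i).2.2.1 c := by
  induction r with
  | zero => simp [FAfold]
  | succ r ih =>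
    rw [FA_succ, Finset.sum_range_succ, ← ih]
    show (FAfold n p t r).2.2.1.foldl (· + ·) (FAfold n p t r).1 = _
    rw [foldl_add_sum]
    congr 1
    rw [← sum_map_getD (FAfold n p t r).2.2.1 n (lensA n p t ht r).2, lsum_eq]
    rfl

theorem fin_length (n : Nat) (p : List (List Int)) (t : List Int) :
    (FAfold n p t n).2.2.2.length = n := by
  cases n with
  | zero => simp [FAfold]
  | succ m => rw [FA_succ]; exact calcRowA_length _ _ _ _

theorem cur_mod_idem (n : Nat) (p : List (List Int)) (t : List Int)
    (hb : ∀ c, 0 ≤ pvIdx t c ∧ pvIdx t c < 4) (i c : Nat) (hc : c < n) :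
    pvIdx (FAfold n p t i).2.2.1 c % 4 = pvIdx (FAfold n p t i).2.2.1 c := by
  cases i with
  | zero =>
    show pvIdx t c % 4 = pvIdx t c
    have := hb c
    omega
  | succ i =>
    rw [FA_succ]
    show pvIdx (complementA (calcRowA n (pvRowA p i)
        (FAfold n p t i).2.1 (FAfold n p t i).2.2.1)) c % 4
      = pvIdx (complementA (calcRowA n (pvRowA p i)
        (FAfold n p t i).2.1 (FAfold n p t i).2.2.1)) c
    unfold pvIdx
    rw [getD_complementA _ _ (by rw [calcRowA_length]; exact hc)]
    omega

theorem fin_mod_idem (n : Nat) (p : List (List Int)) (t : List Int) (ht : t.length = n)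
    (c : Nat) (hc : c < n) (hn : 0 < n) :
    pvIdx (FAfold n p t n).2.2.2 c % 4 = pvIdx (FAfold n p t n).2.2.2 c := by
  obtain ⟨m, rfl⟩ : ∃ m, n = m + 1 := ⟨n - 1, by omega⟩
  rw [FA_succ]
  show pvIdx (calcRowA (m + 1) (pvRowA p m)
      (FAfold (m + 1) p t m).2.1 (FAfold (m + 1) p t m).2.2.1) c % 4
    = pvIdx (calcRowA (m + 1) (pvRowA p m)
      (FAfold (m + 1) p t m).2.1 (FAfold (m + 1) p t m).2.2.1) c
  rw [calcRow_raw (m + 1) (pvRowA p m) _ _ (lensA (m + 1) p t ht m).2 c hc]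
  omega

theorem any_congr_mem (l : List Nat) (f g : Nat → Bool) (h : ∀ c ∈ l, f c = g c) :
    l.any f = l.any g := by
  induction l with
  | nil => rfl
  | cons x xs ih =>
    rw [List.any_cons, List.any_cons, h x (by simp), ih (fun c hc => h c (by simp [hc]))]

theorem any_range (l : List Int) (n : Nat) (h : l.length = n) (f : Int → Bool) :
    (List.range n).any (fun c => f (l.getD c 0)) = l.any f := by
  subst h
  induction l with
  | nil => simp
  | cons x xs ih =>
    rw [List.length_cons, List.range_succ_eq_map]
    simp only [List.any_cons, List.any_map]
    rw [← ih]
    rfl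

-- the ds table of solution_alt, named for the proofs (identical term)
def dsB (n : Nat) (p : List (List Int)) : List (List (List Int) × List Int) :=
  (List.range n).map (fun j =>
    let u := cascadeB n p (unitB n j)
    ((List.range n).map (fun i => (List.range n).map (fun c =>
        pvIdx (pvRowA u.1 i) c - pvIdx (pvRowA (cascadeB n p (List.replicate n 0)).1 i) c)),
     (List.range n).map (fun c => pvIdx u.2 c - pvIdx (cascadeB n p (List.replicate n 0)).2 c)))

def bodyB (n : Nat) (p : List (List Int)) (best : Int) (t : List Int) : Int :=
  if (List.range n).any (fun c =>
      (pvIdx (cascadeB n p (List.replicate n 0)).2 c +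
        ((List.range n).map (fun j => pvIdx t j * pvIdx ((dsB n p).getD j ([], [])).2 c)).sum) % 4 ≠ 0)
  then best
  else
    let cost := ((List.range n).map (fun i =>
      ((List.range n).map (fun c =>
        (pvIdx (pvRowA (cascadeB n p (List.replicate n 0)).1 i) c +
          ((List.range n).map (fun j =>
            pvIdx t j * pvIdx (pvRowA ((dsB n p).getD j ([], [])).1 i) c)).sum) % 4)).sum)).sum
    if cost < best then cost else best

theorem solution_alt_eq (p : List (List Int)) :
    solution_alt p = (List.range (4 ^ p.length)).foldl
      (fun best mask => bodyB p.length p best (decodeB p.length mask)) ((10 : Int) ^ 9) := rfl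

-- the B cell expressions are the affine combinations
theorem lastcell_eq (n : Nat) (p : List (List Int)) (t : List Int) (c : Nat) (hc : c < n) :
    pvIdx (cascadeB n p (List.replicate n 0)).2 c +
        ((List.range n).map (fun j => pvIdx t j * pvIdx ((dsB n p).getD j ([], [])).2 c)).sum
      = combF n t (fun s => pvIdx (FAfold n p s n).2.2.2 c) := by
  unfold combF
  rw [cascB n p (List.replicate n 0) (by simp), lsum_eq]
  congr 1
  apply Finset.sum_congr rfl
  intro j hj
  have hj' := Finset.mem_range.mp hj
  unfold dsB
  rw [getD_map_range n _ j ([], []) hj']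
  simp only []
  rw [show pvIdx ((List.range n).map (fun c =>
        pvIdx (cascadeB n p (unitB n j)).2 c - pvIdx (cascadeB n p (List.replicate n 0)).2 c)) c
      = pvIdx (cascadeB n p (unitB n j)).2 c - pvIdx (cascadeB n p (List.replicate n 0)).2 c
    from getD_map_range n _ c 0 hc]
  rw [cascB n p (unitB n j) (unitB_length n j), cascB n p (List.replicate n 0) (by simp)]

theorem rowcell_eq (n : Nat) (p : List (List Int)) (t : List Int) (i c : Nat)
    (hi : i < n) (hc : c < n) :
    pvIdx (pvRowA (cascadeB n p (List.replicate n 0)).1 i) c +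
        ((List.range n).map (fun j =>
          pvIdx t j * pvIdx (pvRowA ((dsB n p).getD j ([], [])).1 i) c)).sum
      = combF n t (fun s => pvIdx (FAfold n p s i).2.2.1 c) := by
  unfold combF
  rw [cascB n p (List.replicate n 0) (by simp), lsum_eq]
  rw [show pvRowA ((List.range n).map (fun i => (FAfold n p (List.replicate n 0) i).2.2.1)) i
      = (FAfold n p (List.replicate n 0) i).2.2.1 from getD_map_range n _ i [] hi]
  congr 1
  apply Finset.sum_congr rfl
  intro j hj
  have hj' := Finset.mem_range.mp hj
  unfold dsB
  rw [getD_map_range n _ j ([], []) hj']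
  simp only []
  rw [show pvRowA ((List.range n).map (fun i => (List.range n).map (fun c =>
        pvIdx (pvRowA (cascadeB n p (unitB n j)).1 i) c -
          pvIdx (pvRowA (cascadeB n p (List.replicate n 0)).1 i) c))) i
      = (List.range n).map (fun c =>
          pvIdx (pvRowA (cascadeB n p (unitB n j)).1 i) c -
            pvIdx (pvRowA (cascadeB n p (List.replicate n 0)).1 i) c)
    from getD_map_range n _ i [] hi]
  rw [show pvIdx ((List.range n).map (fun c =>
        pvIdx (pvRowA (cascadeB n p (unitB n j)).1 i) c -
          pvIdx (pvRowA (cascadeB n p (List.replicate n 0)).1 i) c)) c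
      = pvIdx (pvRowA (cascadeB n p (unitB n j)).1 i) c -
          pvIdx (pvRowA (cascadeB n p (List.replicate n 0)).1 i) c
    from getD_map_range n _ c 0 hc]
  rw [cascB n p (unitB n j) (unitB_length n j), cascB n p (List.replicate n 0) (by simp)]
  rw [show pvRowA ((List.range n).map (fun i => (FAfold n p (unitB n j) i).2.2.1)) i
      = (FAfold n p (unitB n j) i).2.2.1 from getD_map_range n _ i [] hi]
  rw [show pvRowA ((List.range n).map (fun i => (FAfold n p (List.replicate n 0) i).2.2.1)) i
      = (FAfold n p (List.replicate n 0) i).2.2.1 from getD_map_range n _ i [] hi]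

theorem maskB_eq (p : List (List Int)) (t : List Int) (ht : t.length = p.length)
    (hb : ∀ c, 0 ≤ pvIdx t c ∧ pvIdx t c < 4) (best : Int) (hbest : best ≤ 10 ^ 9) :
    bodyB p.length p best t
      = if solveCountA p.length t p < best then solveCountA p.length t p else best := by
  have ht' : t.length = p.length := ht
  generalize hn : p.length = n at ht' ⊢
  have hlast : ∀ c, c < n →
      (pvIdx (cascadeB n p (List.replicate n 0)).2 c +
        ((List.range n).map (fun j => pvIdx t j * pvIdx ((dsB n p).getD j ([], [])).2 c)).sum) % 4
      = pvIdx (FAfold n p t n).2.2.2 c := by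
    intro c hc
    rw [lastcell_eq n p t c hc]
    have h1 := (invA n p t ht' n).2.2 c hc (by omega)
    unfold Int.ModEq at h1
    rw [← h1]
    exact fin_mod_idem n p t ht' c hc (by omega)
  have hany : ((List.range n).any (fun c =>
      decide ((pvIdx (cascadeB n p (List.replicate n 0)).2 c +
        ((List.range n).map (fun j => pvIdx t j * pvIdx ((dsB n p).getD j ([], [])).2 c)).sum) % 4 ≠ 0)))
      = (FAfold n p t n).2.2.2.any (fun e => decide (e ≠ 0)) := by
    rw [← any_range (FAfold n p t n).2.2.2 n (fin_length n p t) (fun e => decide (e ≠ 0))]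
    apply any_congr_mem
    intro c hcmem
    have hc := List.mem_range.mp hcmem
    show decide ((pvIdx (cascadeB n p (List.replicate n 0)).2 c +
        ((List.range n).map (fun j =>
          pvIdx t j * pvIdx ((dsB n p).getD j ([], [])).2 c)).sum) % 4 ≠ 0)
      = decide (pvIdx (FAfold n p t n).2.2.2 c ≠ 0)
    rw [hlast c hc]
  have hcost : ((List.range n).map (fun i =>
      ((List.range n).map (fun c =>
        (pvIdx (pvRowA (cascadeB n p (List.replicate n 0)).1 i) c +
          ((List.range n).map (fun j =>
            pvIdx t j * pvIdx (pvRowA ((dsB n p).getD j ([], [])).1 i) c)).sum) % 4)).sum)).sum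
      = (FAfold n p t n).1 := by
    rw [countA_sum n p t ht' n, lsum_eq]
    apply Finset.sum_congr rfl
    intro i hi
    rw [lsum_eq]
    apply Finset.sum_congr rfl
    intro c hc
    rw [rowcell_eq n p t i c (Finset.mem_range.mp hi) (Finset.mem_range.mp hc)]
    have h1 := (invA n p t ht' i).2.1 c (Finset.mem_range.mp hc)
    unfold Int.ModEq at h1
    rw [← h1]
    exact cur_mod_idem n p t hb i c (Finset.mem_range.mp hc)
  rw [solveCountA_eq]
  unfold bodyB
  rw [hany, hcost]
  by_cases hf : ((FAfold n p t n).2.2.2.any (fun e => decide (e ≠ 0))) = true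
  · rw [if_pos hf, if_pos hf, if_neg (by omega)]
  · rw [if_neg hf, if_neg hf]

def digitsL : Nat → Nat → List Int
  | 0, _ => []
  | s + 1, m => ((m % 4 : Nat) : Int) :: digitsL s (m / 4)

theorem digitsL_length (s m : Nat) : (digitsL s m).length = s := by
  induction s generalizing m with
  | zero => rfl
  | succ s ih => simp [digitsL, ih]

theorem digitsL_zero (s : Nat) : digitsL s 0 = List.replicate s 0 := by
  induction s with
  | zero => rfl
  | succ s ih => simp [digitsL, ih, List.replicate_succ]

theorem digitsL_bound (s m c : Nat) :
    0 ≤ pvIdx (digitsL s m) c ∧ pvIdx (digitsL s m) c < 4 := by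
  induction s generalizing m c with
  | zero =>
    show 0 ≤ pvIdx [] c ∧ pvIdx [] c < 4
    unfold pvIdx
    simp [List.getD]
  | succ s ih =>
    cases c with
    | zero =>
      show 0 ≤ (((m % 4 : Nat) : Int)) ∧ (((m % 4 : Nat) : Int)) < 4
      constructor <;> [positivity; (push_cast; omega)]
    | succ c => exact ih (m / 4) c

theorem and_three (n : Nat) : n &&& 3 = n % 4 := by
  have := Nat.and_two_pow_sub_one_eq_mod n 2
  norm_num at this; omega

theorem decode_eq_digits (s m : Nat) : decodeB s m = digitsL s m := by
  induction s generalizing m with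
  | zero => rfl
  | succ s ih =>
    unfold decodeB digitsL
    rw [List.range_succ_eq_map, List.map_cons, List.map_map]
    congr 1
    · norm_num [and_three]
    · rw [← ih (m / 4)]
      unfold decodeB
      apply List.map_congr_left
      intro i _
      simp only [Function.comp]
      have h1 : 2 * (i + 1) = 2 + 2 * i := by ring
      have h2 : m >>> 2 = m / 4 := by rw [Nat.shiftRight_eq_div_pow]; try norm_num
      rw [h1, Nat.shiftRight_add, h2]

theorem nextChoice_digits (s m : Nat) : nextChoiceA (digitsL s m) = digitsL s (m + 1) := by
  induction s generalizing m with
  | zero => rfl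
  | succ s ih =>
    unfold digitsL nextChoiceA
    by_cases hm : m % 4 = 3
    · rw [if_pos (by rw [hm]; norm_num), ih (m / 4)]
      have h1 : (m + 1) % 4 = 0 := by omega
      have h2 : (m + 1) / 4 = m / 4 + 1 := by omega
      rw [h1, h2]
      norm_num
    · rw [if_neg (by push_cast; omega)]
      have h1 : (m + 1) % 4 = m % 4 + 1 := by omega
      have h2 : (m + 1) / 4 = m / 4 := by omega
      rw [h1, h2]
      push_cast
      ring_nf

theorem outer (p : List (List Int)) (N : Nat) :
    (((List.range N).foldl
      (fun (st : Int × List Int) _ =>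
        let count := solveCountA p.length st.2 p
        ((if count < st.1 then count else st.1), nextChoiceA st.2))
      ((10 : Int) ^ 9, List.replicate p.length 0)).1
      = (List.range N).foldl
          (fun best mask => bodyB p.length p best (decodeB p.length mask)) ((10 : Int) ^ 9))
    ∧ (((List.range N).foldl
      (fun (st : Int × List Int) _ =>
        let count := solveCountA p.length st.2 p
        ((if count < st.1 then count else st.1), nextChoiceA st.2))
      ((10 : Int) ^ 9, List.replicate p.length 0)).2 = digitsL p.length N)
    ∧ (List.range N).foldl
        (fun best mask => bodyB p.length p best (decodeB p.length mask)) ((10 : Int) ^ 9)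
      ≤ 10 ^ 9 := by
  induction N with
  | zero => exact ⟨rfl, (digitsL_zero p.length).symm, le_refl _⟩
  | succ N ih =>
    obtain ⟨ih1, ih2, ih3⟩ := ih
    simp only [List.range_succ, List.foldl_append, List.foldl_cons, List.foldl_nil]
    rw [decode_eq_digits]
    have hB := maskB_eq p (digitsL p.length N) (digitsL_length _ _)
      (fun c => digitsL_bound p.length N c) _ ih3
    refine ⟨?_, ?_, ?_⟩
    · show (if solveCountA p.length _ p < _ then solveCountA p.length _ p else _) = _
      rw [ih2, ih1, hB]
    · show nextChoiceA _ = _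
      rw [ih2, nextChoice_digits]
    · rw [hB]
      split_ifs with h
      · calc solveCountA p.length (digitsL p.length N) p ≤ _ := le_of_lt h
          _ ≤ 10 ^ 9 := ih3
      · exact ih3

theorem solution_spec_aux : ∀ (clockHands : List (List Int)),
    solution clockHands = solution_alt clockHands := by
  intro p
  rw [solution_alt_eq]
  exact (outer p (4 ^ p.length)).1

-- ===== VERDICT (by name: the statement is the Claim_ definition above) =====
theorem solution_spec : Claim_equal_solution := by
  intro clockHands _ _
  unfold Spec_solution
  exact solution_spec_aux clockHands
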